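-- pv_equiv track=rewrite | github.com/ImmortalDemonGod/arc-neural-reasoning-model | arc_sat_solver/src/sat_solver/cnf_converter.py | from_dnf
-- ===== SOURCE A (Python) =====
-- from typing import List
--
-- def from_dnf(dnf: List[List[str]]) -> List[List[str]]:
--     if not dnf:
--         return []
--
--     result = [[term] for term in dnf[0]]
--
--     for clause in dnf[1:]:
--         new_result = []
--         for term in clause:
--             for existing in result:
--                 new_result.append(existing + [term])
--         result = new_result
--
--     return result
-- ===== SOURCE B (Python) =====
-- def from_dnf(dnf):
--     def combos(clauses):
--         if not clauses:
--             return [[]]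
--         first, rest = clauses[0], clauses[1:]
--         return [[t] + r for r in combos(rest) for t in first]
--     if not dnf:
--         return []
--     return combos(dnf)
-- ===== Notes on version B (the rewrite author's own statement) =====
-- stated objective: alternative
-- what changed: Replaces the left-folding loop that rebuilds the whole result per clause with a right recursion over the clause list (base [[]]), consing terms of the head clause onto each tail combination so the first clause varies fastest.
import Mathlib
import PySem

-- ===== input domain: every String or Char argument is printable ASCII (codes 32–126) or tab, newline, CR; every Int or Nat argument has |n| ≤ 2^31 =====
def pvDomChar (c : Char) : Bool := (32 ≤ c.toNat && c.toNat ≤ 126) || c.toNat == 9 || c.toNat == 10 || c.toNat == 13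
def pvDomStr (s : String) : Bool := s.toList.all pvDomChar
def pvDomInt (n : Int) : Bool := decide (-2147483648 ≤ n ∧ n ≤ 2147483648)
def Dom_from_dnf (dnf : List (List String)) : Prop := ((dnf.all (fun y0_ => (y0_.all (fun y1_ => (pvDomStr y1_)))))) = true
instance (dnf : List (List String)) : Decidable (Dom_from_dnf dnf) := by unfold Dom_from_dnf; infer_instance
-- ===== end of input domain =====

-- B builds the same Cartesian product by right recursion over the clause list instead of A's
-- left-folding rebuild; return values agree everywhere (neither mutates its argument).

-- ===== PORT A =====
-- one pass of A's inner two loops: for term in clause: for existing in result: new_result.append(existing + [term])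
def fromDnfStep (result : List (List String)) (clause : List String) : List (List String) :=
  clause.foldl (fun newResult term =>
    result.foldl (fun acc existing => acc ++ [existing ++ [term]]) newResult) []

def from_dnf (dnf : List (List String)) : List (List String) :=
  match dnf with
  | [] => []
  | c :: rest => rest.foldl fromDnfStep (c.map (fun term => [term]))

-- ===== PORT B =====
-- combos: [[]] on [], else [[t] + r for r in combos(rest) for t in first]
def fromDnfCombos : List (List String) → List (List String)
  | [] => [[]]
  | first :: rest => (fromDnfCombos rest).flatMap (fun r => first.map (fun t => t :: r))

def from_dnf_alt (dnf : List (List String)) : List (List String) :=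
  if dnf = [] then [] else fromDnfCombos dnf

-- ===== PRECONDITION & SPEC =====
def Spec_from_dnf (dnf : List (List String)) (out : List (List String)) : Prop := out = from_dnf_alt dnf
instance (dnf : List (List String)) (out : List (List String)) : Decidable (Spec_from_dnf dnf out) := by unfold Spec_from_dnf; infer_instance

-- ===== CLAIM (what is proved, stated in full; the proofs are below) =====
def Claim_equal_from_dnf : Prop := ∀ (dnf : List (List String)), Dom_from_dnf dnf → Spec_from_dnf dnf (from_dnf dnf)

-- ===== LEMMAS AND PROOFS =====

theorem foldl_append_map (result acc : List (List String)) (term : String) :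
    result.foldl (fun a existing => a ++ [existing ++ [term]]) acc
      = acc ++ result.map (fun existing => existing ++ [term]) := by
  induction result generalizing acc with
  | nil => simp
  | cons x xs ih => simp [List.foldl_cons, ih]

theorem step_from (result : List (List String)) (clause : List String)
    (init : List (List String)) :
    clause.foldl (fun newResult term =>
        result.foldl (fun acc existing => acc ++ [existing ++ [term]]) newResult) init
      = init ++ clause.flatMap (fun term => result.map (fun existing => existing ++ [term])) := by
  induction clause generalizing init with
  | nil => simp
  | cons t ts ih =>
    simp only [List.foldl_cons, List.flatMap_cons]
    rw [foldl_append_map, ih]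
    simp

theorem step_eq (result : List (List String)) (clause : List String) :
    fromDnfStep result clause
      = clause.flatMap (fun term => result.map (fun existing => existing ++ [term])) := by
  unfold fromDnfStep
  rw [step_from]
  simp

theorem foldl_step_eq (rest : List (List String)) (acc : List (List String)) :
    rest.foldl fromDnfStep acc
      = (fromDnfCombos rest).flatMap (fun r => acc.map (fun e => e ++ r)) := by
  induction rest generalizing acc with
  | nil => simp [fromDnfCombos]
  | cons c cs ih =>
    simp only [List.foldl_cons, fromDnfCombos]
    rw [ih, step_eq]
    simp [List.flatMap_assoc, List.flatMap_map, List.map_flatMap, List.map_map, Function.comp_def, List.append_assoc]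

theorem from_dnf_spec : Claim_equal_from_dnf := by
  intro dnf _
  unfold Spec_from_dnf from_dnf from_dnf_alt
  match dnf with
  | [] => rfl
  | c :: rest =>
    simp only [reduceCtorEq, if_false, fromDnfCombos]
    rw [foldl_step_eq]
    simp [List.map_map, Function.comp_def]

-- ===== VERDICT (by name: the statement is the Claim_ definition above) =====
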